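-- pv_equiv track=rewrite | github.com/high-dimensional/3d_very_deep_vae | SharedModules/misc.py | joint_distributions
-- ===== SOURCE A (Python) =====
-- import itertools
--
-- def joint_distributions(s):
--     all_permutations = list(itertools.permutations(s))
--     all_permutations = [list(perm) for perm in all_permutations]
--
--     all_joints = []
--     for current_permutation in all_permutations:
--         current_joint = []
--
--         while len(current_permutation) > 1:
--             current_joint.append(current_permutation[0] + '|' + ','.join(current_permutation[1:]))
--             current_permutation = current_permutation[1:]
--
--         if len(current_permutation) == 1:
--             current_joint.append(current_permutation[0])
--
--         all_joints.append(current_joint)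
--
--     if len(all_joints) == 1 and len(all_joints[0]) == 1:
--         all_joints = all_joints[0]
--
--     return all_joints
-- ===== SOURCE B (Python) =====
-- import itertools
--
-- def joint_distributions(s):
--     all_joints = []
--     for perm in itertools.permutations(s):
--         entries = []
--         suffix = None
--         for x in reversed(perm):
--             if suffix is None:
--                 entries.append(x)
--                 suffix = x
--             else:
--                 entries.append(x + '|' + suffix)
--                 suffix = x + ',' + suffix
--         entries.reverse()
--         all_joints.append(entries)
--
--     if len(all_joints) == 1 and len(all_joints[0]) == 1:
--         all_joints = all_joints[0]
--
--     return all_joints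
-- ===== Notes on version B (the rewrite author's own statement) =====
-- stated objective: faster
-- what changed: Per permutation, instead of repeatedly re-joining the whole tail with ','.join on each while-iteration (quadratic per permutation), B walks the permutation once in reverse keeping a running suffix string, emitting each entry from it and reversing the collected entries at the end.
-- outside the precondition, e.g. on joint_distributions(['a']): A returns ['a'], B returns ['a']
import Mathlib
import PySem

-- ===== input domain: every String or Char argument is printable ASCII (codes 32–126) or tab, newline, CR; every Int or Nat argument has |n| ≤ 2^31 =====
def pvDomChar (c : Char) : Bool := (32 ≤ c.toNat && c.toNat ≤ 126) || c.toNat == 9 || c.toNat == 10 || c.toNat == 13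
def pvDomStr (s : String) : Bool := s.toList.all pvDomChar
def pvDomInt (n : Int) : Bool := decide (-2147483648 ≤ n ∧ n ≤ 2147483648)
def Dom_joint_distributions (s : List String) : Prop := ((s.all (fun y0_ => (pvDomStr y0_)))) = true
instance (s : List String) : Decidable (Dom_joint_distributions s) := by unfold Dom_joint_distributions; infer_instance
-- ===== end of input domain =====

-- B replaces A's per-permutation while-loop (which re-joins the whole tail with ','.join at
-- every step) by a single reverse pass maintaining a running suffix string; objective: faster
-- (constant-factor: each comma-join step is done once instead of re-done per position).


-- ===== PORT A =====
-- A's while-loop over the shrinking permutation: emit head + '|' + ','.join(tail), drop head.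
def pvJointA : List String → List String
  | [] => []
  | [x] => [x]
  | x :: y :: rest => (x ++ "|" ++ PySem.Str.join "," (y :: rest)) :: pvJointA (y :: rest)

def joint_distributions (s : List String) : List (List String) :=
  -- Python's final flatten (which fires exactly when s has one element) returns a plain list
  -- of strings there, outside the declared List (List String) type; Pre_ excludes that case,
  -- so the port omits the flatten branch.
  (PySem.List.permutations s s.length).map pvJointA

-- ===== PORT B =====
-- B's reverse pass: state = (entries collected so far in reverse-encounter order, running suffix).
def pvStepB (st : List String × Option String) (x : String) : List String × Option String :=
  match st.2 with
  | none => (st.1 ++ [x], some x)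
  | some suf => (st.1 ++ [x ++ "|" ++ suf], some (x ++ "," ++ suf))

def pvJointB (perm : List String) : List String :=
  (perm.reverse.foldl pvStepB ([], none)).1.reverse

def joint_distributions_alt (s : List String) : List (List String) :=
  -- same flatten omission as in the port of A, excluded by Pre_
  (PySem.List.permutations s s.length).map pvJointB

-- ===== PRECONDITION & SPEC =====
-- Pre_ excludes one-element lists: there the Python flatten step makes both programs return a
-- plain list of strings, which is not a value of the declared List (List String) return type.
def Pre_joint_distributions (s : List String) : Prop := s.length ≠ 1
instance (s : List String) : Decidable (Pre_joint_distributions s) := by unfold Pre_joint_distributions; infer_instance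
def pvWitness_joint_distributions : List String := ["a", "b"]

def Spec_joint_distributions (s : List String) (out : List (List String)) : Prop := out = joint_distributions_alt s
instance (s : List String) (out : List (List String)) : Decidable (Spec_joint_distributions s out) := by unfold Spec_joint_distributions; infer_instance

-- ===== CLAIM (what is proved, stated in full; the proofs are below) =====
def Claim_equal_joint_distributions : Prop := ∀ (s : List String), Dom_joint_distributions s → Pre_joint_distributions s → Spec_joint_distributions s (joint_distributions s)

-- ===== LEMMAS AND PROOFS =====
lemma pv_join_singleton (x : String) : PySem.Str.join "," [x] = x := by
  apply String.toList_injective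
  simp [PySem.Str.toList_join, PySem.Chars.join_singleton]

lemma pv_join_cons_cons (p q : String) (rest : List String) :
    PySem.Str.join "," (p :: q :: rest) = p ++ "," ++ PySem.Str.join "," (q :: rest) := by
  apply String.toList_injective
  simp [PySem.Str.toList_join, PySem.Chars.join_cons_cons]

lemma pv_loopB (xs : List String) (hx : xs ≠ []) :
    xs.reverse.foldl pvStepB ([], none) =
      ((pvJointA xs).reverse, some (PySem.Str.join "," xs)) := by
  induction xs with
  | nil => exact absurd rfl hx
  | cons x xs ih =>
    cases xs with
    | nil => simp [pvJointA, pvStepB, pv_join_singleton]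
    | cons y rest =>
      have : (x :: y :: rest).reverse = (y :: rest).reverse ++ [x] := by simp
      rw [this, List.foldl_append, ih (by simp)]
      simp [pvStepB, pvJointA, pv_join_cons_cons]

lemma pv_jointB_eq_jointA (perm : List String) : pvJointB perm = pvJointA perm := by
  cases perm with
  | nil => rfl
  | cons x xs =>
    unfold pvJointB
    rw [pv_loopB (x :: xs) (by simp)]
    simp

-- ===== VERDICT (by name: the statement is the Claim_ definition above) =====
theorem joint_distributions_spec : Claim_equal_joint_distributions := by
  intro s _ _
  unfold Spec_joint_distributions joint_distributions joint_distributions_alt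
  exact (List.map_congr_left fun p _ => (pv_jointB_eq_jointA p)).symm
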